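-- pv_equiv track=rewrite | github.com/sc-lj/bart_absa | data/pipe.py | match_index
-- ===== SOURCE A (Python) =====
-- def match_index(word_bpes,aspect_index,opinion_index):
--     """[匹配索引]
--
--     Args:
--         word_bpes ([type]): [description]
--         aspect_index ([type]): [description]
--         opinion_index ([type]): [description]
--     """
--     length = len(word_bpes)
--     expect_aspect_index = []
--     expect_opinion_index = []
--     for i in range(length):
--         if aspect_index == word_bpes[i:i+len(aspect_index)]:
--             expect_aspect_index.append([i,i+len(aspect_index)])
--         if opinion_index == word_bpes[i:i+len(opinion_index)]:
--             expect_opinion_index.append([i,i+len(opinion_index)])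
--
--     min_dis = float('inf')
--     min_pair = []
--     for a_index in expect_aspect_index:
--         for o_index in expect_opinion_index:
--             if min(abs(a_index[-1]-o_index[0]),abs(a_index[0]-o_index[-1])) <min_dis:
--                 min_pair=(a_index,o_index)
--                 min_dis = min(abs(a_index[-1]-o_index[0]),abs(a_index[0]-o_index[-1]))
--                 continue
--     return min_pair
-- ===== SOURCE B (Python) =====
-- from bisect import bisect_left
--
-- def match_index(word_bpes, aspect_index, opinion_index):
--     n = len(word_bpes)
--
--     # hash index: positions of each token value, built once
--     positions = {}
--     for i, v in enumerate(word_bpes):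
--         positions.setdefault(v, []).append(i)
--
--     def occ(pat):
--         # occurrence start positions (ascending): candidates come from the
--         # hash index on the first token instead of scanning every position
--         if not pat:
--             return list(range(n))
--         return [i for i in positions.get(pat[0], [])
--                 if word_bpes[i + 1:i + len(pat)] == pat[1:]]
--
--     As = occ(aspect_index)
--     Os = occ(opinion_index)
--     if not As or not Os:
--         return []
--
--     la, lo = len(aspect_index), len(opinion_index)
--
--     def best_for(a):
--         # d(a,o) = min(|a+la-o|, |a-o-lo|) = distance from o to the nearer of
--         # the two valley points a-lo and a+la; over the sorted list Os its
--         # lexicographic minimum of (d, o) is attained at a bisection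
--         # neighbour of one of the valleys.
--         best = None
--         for x in (a - lo, a + la):
--             j = bisect_left(Os, x)
--             for k in (j - 1, j):
--                 if 0 <= k < len(Os):
--                     o = Os[k]
--                     cand = (min(abs(a + la - o), abs(a - o - lo)), o)
--                     if best is None or cand < best:
--                         best = cand
--         return best
--
--     best = None  # (d, a, o)
--     for a in As:
--         d, o = best_for(a)
--         if best is None or d < best[0]:
--             best = (d, a, o)
--     _, a, o = best
--     return [a, a + la], [o, o + lo]
-- ===== Notes on version B (the rewrite author's own statement) =====
-- stated objective: faster
-- what changed: B finds occurrence starts through a hash index of token positions (dict value->positions, verifying only candidates that share the first token) and replaces A's brute-force scan over all aspect-opinion occurrence pairs by a binary search (bisect_left) for the two distance-valley points a-lo and a+la in the sorted opinion-occurrence list, examining at most 4 candidate opinions per aspect occurrence.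
import Mathlib
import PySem

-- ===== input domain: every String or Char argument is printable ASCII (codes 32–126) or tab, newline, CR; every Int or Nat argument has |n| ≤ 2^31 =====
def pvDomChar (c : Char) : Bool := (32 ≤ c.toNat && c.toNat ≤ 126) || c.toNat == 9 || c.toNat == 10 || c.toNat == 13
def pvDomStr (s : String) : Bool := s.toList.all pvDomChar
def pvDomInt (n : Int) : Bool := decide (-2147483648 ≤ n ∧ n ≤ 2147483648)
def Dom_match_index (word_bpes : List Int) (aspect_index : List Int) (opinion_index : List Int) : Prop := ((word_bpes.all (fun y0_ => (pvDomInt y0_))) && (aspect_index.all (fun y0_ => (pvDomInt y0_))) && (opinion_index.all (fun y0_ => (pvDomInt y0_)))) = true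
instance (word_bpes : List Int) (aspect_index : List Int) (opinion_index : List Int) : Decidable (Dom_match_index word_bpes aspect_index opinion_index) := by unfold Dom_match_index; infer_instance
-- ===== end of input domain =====

-- B finds occurrence starts through a hash index on the first pattern token and picks the
-- closest pair by binary search for the two distance-valley points in the sorted opinion
-- occurrence list (at most 4 candidates per aspect occurrence) instead of A's scan over all pairs.

-- ===== PORT A =====
def match_index (word_bpes : List Int) (aspect_index : List Int) (opinion_index : List Int) : List (List Int) :=
  let length : Int := (word_bpes.length : Int)
  let occ := (PySem.List.pyRange 0 length 1).foldl
    (fun (st : List (List Int) × List (List Int)) i =>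
      (if aspect_index == PySem.List.slice word_bpes (some i) (some (i + (aspect_index.length : Int)))
         then st.1 ++ [[i, i + (aspect_index.length : Int)]] else st.1,
       if opinion_index == PySem.List.slice word_bpes (some i) (some (i + (opinion_index.length : Int)))
         then st.2 ++ [[i, i + (opinion_index.length : Int)]] else st.2))
    ([], [])
  -- min_dis = float('inf') is modelled as `none`; any int is < inf
  let res := occ.1.foldl (fun (st : Option Int × List (List Int)) aIdx =>
    occ.2.foldl (fun (st : Option Int × List (List Int)) oIdx =>
      let d := min |PySem.List.pyGetD aIdx (-1) 0 - PySem.List.pyGetD oIdx 0 0|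
                   |PySem.List.pyGetD aIdx 0 0 - PySem.List.pyGetD oIdx (-1) 0|
      if (match st.1 with | none => true | some m => decide (d < m))
        then (some d, [aIdx, oIdx]) else st) st) (none, [])
  res.2

-- ===== PORT B =====
-- Source B: positions.setdefault(v, []).append(i)  ==  d[v] = d.get(v, []) + [i]  (Dict.modify)
def pvPositions (w : List Int) : PySem.Dict Int (List Int) :=
  (PySem.List.enumerate w 0).foldl (fun d iv => d.modify iv.2 [] (· ++ [iv.1])) PySem.Dict.empty

-- Source B: occ(pat) — candidate starts from the hash index on pat[0], verified by slice compare
def pvOcc (w : List Int) (pos : PySem.Dict Int (List Int)) (pat : List Int) : List Int :=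
  match pat with
  | [] => PySem.List.pyRange 0 (w.length : Int) 1
  | p :: rest =>
    (pos.getD p []).filter (fun i =>
      PySem.List.slice w (some (i + 1)) (some (i + ((rest.length : Int) + 1))) == rest)

-- Python's `<` on int pairs (tuple comparison is lexicographic)
def pvLexLt (p q : Int × Int) : Bool := p.1 < q.1 || (p.1 == q.1 && p.2 < q.2)

-- Source B: the body of `for k in (j - 1, j): if 0 <= k < len(Os): …`
def pvConsider (Os : List Int) (la lo a : Int) (best : Option (Int × Int)) (k : Int) : Option (Int × Int) :=
  if 0 ≤ k ∧ k < (Os.length : Int) then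
    let o := Os.getD k.toNat 0
    let cand : Int × Int := (min |a + la - o| |a - o - lo|, o)
    match best with
    | none => some cand
    | some b => if pvLexLt cand b then some cand else some b
  else best

-- Source B: best_for(a) — bisect_left ported as PySem.List.bisectLeft (exact for the sorted Os)
def pvBestFor (Os : List Int) (la lo a : Int) : Option (Int × Int) :=
  [a - lo, a + la].foldl (fun best x =>
    let j : Int := (PySem.List.bisectLeft Os x : Int)
    [j - 1, j].foldl (pvConsider Os la lo a) best) none

def match_index_alt (word_bpes : List Int) (aspect_index : List Int) (opinion_index : List Int) : List (List Int) :=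
  let pos := pvPositions word_bpes
  let As := pvOcc word_bpes pos aspect_index
  let Os := pvOcc word_bpes pos opinion_index
  if As = [] ∨ Os = [] then []
  else
    let la : Int := (aspect_index.length : Int)
    let lo : Int := (opinion_index.length : Int)
    let best := As.foldl (fun (b : Option (Int × Int × Int)) ai =>
      match pvBestFor Os la lo ai with
      | none => b
      | some (d, oi) =>
        match b with
        | none => some (d, ai, oi)
        | some bb => if d < bb.1 then some (d, ai, oi) else some bb) none
    match best with
    | none => []
    | some (_, ai, oi) => [[ai, ai + la], [oi, oi + lo]]

-- ===== PRECONDITION & SPEC =====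
def Spec_match_index (word_bpes : List Int) (aspect_index : List Int) (opinion_index : List Int) (out : List (List Int)) : Prop := out = match_index_alt word_bpes aspect_index opinion_index
instance (word_bpes : List Int) (aspect_index : List Int) (opinion_index : List Int) (out : List (List Int)) : Decidable (Spec_match_index word_bpes aspect_index opinion_index out) := by unfold Spec_match_index; infer_instance

-- ===== CLAIM (what is proved, stated in full; the proofs are below) =====
def Claim_equal_match_index : Prop := ∀ (word_bpes : List Int) (aspect_index : List Int) (opinion_index : List Int), Dom_match_index word_bpes aspect_index opinion_index → Spec_match_index word_bpes aspect_index opinion_index (match_index word_bpes aspect_index opinion_index)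

-- ===== LEMMAS AND PROOFS =====

-- occurrence starts as A computes them: positions where the pattern matches a slice
def pvOccA (w pat : List Int) : List Int :=
  (PySem.List.pyRange 0 (w.length : Int) 1).filter
    (fun i => pat == PySem.List.slice w (some i) (some (i + (pat.length : Int))))

def pvDv (la lo a o : Int) : Int := min |a + la - o| |a - o - lo|
def pvKey (la lo a o : Int) : Int × Int := (pvDv la lo a o, o)
def pvLe (p q : Int × Int) : Prop := p.1 < q.1 ∨ (p.1 = q.1 ∧ p.2 ≤ q.2)

def pvStepA (la lo a : Int) (st : Option Int × List (List Int)) (o : Int) : Option Int × List (List Int) :=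
  if (match st.1 with | none => true | some m => decide (pvDv la lo a o < m))
    then (some (pvDv la lo a o), [[a, a + la], [o, o + lo]]) else st

def pvStepMin (b : Option (Int × Int)) (c : Int × Int) : Option (Int × Int) :=
  match b with
  | none => some c
  | some bb => if pvLexLt c bb then some c else some bb

def pvValid (Os : List Int) (k : Int) : Bool := decide (0 ≤ k ∧ k < (Os.length : Int))

def pvL (Os : List Int) (la lo a x : Int) : List (Int × Int) :=
  (([(PySem.List.bisectLeft Os x : Int) - 1, (PySem.List.bisectLeft Os x : Int)]).filter (pvValid Os)).map
    (fun k => pvKey la lo a (Os.getD k.toNat 0))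

def pvPhi (la lo : Int) : Option (Int × Int × Int) → Option Int × List (List Int)
  | none => (none, [])
  | some (d, a, o) => (some d, [[a, a + la], [o, o + lo]])

theorem pv_lexLt_iff (p q : Int × Int) : pvLexLt p q = true ↔ (p.1 < q.1 ∨ (p.1 = q.1 ∧ p.2 < q.2)) := by
  simp [pvLexLt]

theorem pv_lexLt_irrefl (p : Int × Int) : ¬ pvLexLt p p = true := by
  simp [pv_lexLt_iff]

theorem pv_lexLt_trans {a b c : Int × Int} (h1 : pvLexLt a b = true) (h2 : pvLexLt b c = true) :
    pvLexLt a c = true := by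
  simp [pv_lexLt_iff] at *; omega

theorem pv_not_lexLt_left {c v r : Int × Int} (h1 : ¬ pvLexLt c v = true) (h2 : ¬ pvLexLt v r = true) :
    ¬ pvLexLt c r = true := by
  simp [pv_lexLt_iff] at *; omega

theorem pv_le_of_not_lexLt {p q : Int × Int} (h : ¬ pvLexLt q p = true) : pvLe p q := by
  simp [pv_lexLt_iff] at h; unfold pvLe; omega

theorem pv_le_trans {a b c : Int × Int} (h1 : pvLe a b) (h2 : pvLe b c) : pvLe a c := by
  unfold pvLe at *; omega

theorem pv_getD_pair_last (x y : Int) : PySem.List.pyGetD [x, y] (-1) 0 = y := by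
  simp [PySem.List.pyGetD_neg_one ([x, y]) 0 (by simp)]

-- Phase 1: the occurrence lists agree.

theorem pv_positions_getD (w : List Int) (v : Int) :
    (pvPositions w).getD v [] =
      (PySem.List.pyRange 0 (w.length : Int) 1).filter (fun i => PySem.List.pyGetD w i 0 == v) := by
  unfold pvPositions
  have h1 : (PySem.List.enumerate w 0).foldl (fun d iv => d.modify iv.2 [] (· ++ [iv.1])) PySem.Dict.empty
      = ((PySem.List.enumerate w 0).map Prod.swap).foldl (fun d p => d.modify p.1 [] (· ++ [p.2])) PySem.Dict.empty := by
    rw [List.foldl_map]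
    rfl
  rw [h1, PySem.Dict.getD_foldl_modify_append]
  rw [PySem.List.enumerate_eq_map_pyRange (d := 0)]
  simp only [List.map_map, List.filter_map, PySem.Dict.getD_empty, List.nil_append]
  simp [Function.comp_def]

theorem pv_occ_alt_eq (w pat : List Int) : pvOcc w (pvPositions w) pat = pvOccA w pat := by
  cases pat with
  | nil =>
    simp only [pvOcc, pvOccA]
    symm
    rw [List.filter_eq_self]
    intro i hi
    obtain ⟨h0, hn⟩ := PySem.List.mem_pyRange_one.mp hi
    lift i to Nat using h0 with j
    simp only [List.length_nil, Nat.cast_zero, add_zero]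
    rw [PySem.List.slice_natCast]
    simp
  | cons p rest =>
    simp only [pvOcc, pvOccA]
    rw [pv_positions_getD w p, List.filter_filter]
    apply List.filter_congr
    intro i hi
    obtain ⟨h0, hn⟩ := PySem.List.mem_pyRange_one.mp hi
    lift i to Nat using h0 with j
    have hj : j < w.length := by exact_mod_cast hn
    have e1 : ((j:Int)+1).toNat = j+1 := by omega
    have e2 : ((j:Int) + ((rest.length:Int)+1)).toNat = j + (rest.length + 1) := by omega
    have e3 : ((j:Int)).toNat = j := by omega
    have hlen : ((p :: rest).length : Int) = ((rest.length:Int) + 1) := by push_cast [List.length_cons]; ring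
    rw [hlen]
    rw [PySem.List.slice_toNat w (by omega) (by omega), PySem.List.slice_toNat w (by omega) (by omega)]
    rw [e1, e2, e3]
    rw [show j + (rest.length + 1) - (j+1) = rest.length from by omega]
    rw [show j + (rest.length + 1) - j = rest.length + 1 from by omega]
    rw [List.drop_eq_getElem_cons hj, List.take_succ_cons]
    rw [PySem.List.pyGetD_natCast, List.getD_eq_getElem w 0 hj]
    rw [Bool.eq_iff_iff]
    simp only [Bool.and_eq_true, beq_iff_eq, List.cons.injEq]
    constructor
    · rintro ⟨h1, h2⟩; exact ⟨h2.symm, h1.symm⟩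
    · rintro ⟨h1, h2⟩; exact ⟨h2.symm, h1.symm⟩

theorem pv_occA_sorted (w pat : List Int) : (pvOccA w pat).Pairwise (· < ·) :=
  List.Pairwise.filter _ (PySem.List.pairwise_lt_pyRange_one 0 (w.length : Int))

-- Phase 2: A's nested min-tracking scan = B's bisect-candidate selection.

theorem pv_consider_foldl (Os : List Int) (la lo a : Int) (ks : List Int) (b : Option (Int × Int)) :
    ks.foldl (pvConsider Os la lo a) b
      = ((ks.filter (pvValid Os)).map (fun k => pvKey la lo a (Os.getD k.toNat 0))).foldl pvStepMin b := by
  induction ks generalizing b with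
  | nil => rfl
  | cons k ks ih =>
    rw [List.foldl_cons, ih]
    by_cases h : 0 ≤ k ∧ k < (Os.length : Int)
    · rw [List.filter_cons_of_pos (by simp [pvValid, h]), List.map_cons, List.foldl_cons]
      congr 1
      simp [pvConsider, h, pvStepMin, pvKey, pvDv]
    · rw [List.filter_cons_of_neg (by simp [pvValid]; omega)]
      congr 1
      simp [pvConsider, h]

theorem pv_stepfold_some (L : List (Int × Int)) (b : Option (Int × Int)) (hne : L ≠ []) :
    ∃ r, L.foldl pvStepMin b = some r := by
  induction L generalizing b with
  | nil => exact absurd rfl hne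
  | cons c cs ih =>
    rw [List.foldl_cons]
    rcases eq_or_ne cs [] with h | h
    · subst h
      cases b with
      | none => exact ⟨c, rfl⟩
      | some v =>
        by_cases hlt : pvLexLt c v = true
        · exact ⟨c, by simp [pvStepMin, hlt]⟩
        · exact ⟨v, by simp [pvStepMin, hlt]⟩
    · exact ih _ h

theorem pv_stepfold_min (L : List (Int × Int)) : ∀ (b : Option (Int × Int)) (r : Int × Int),
    L.foldl pvStepMin b = some r →
      (b = some r ∨ r ∈ L) ∧ (∀ c ∈ L, ¬ pvLexLt c r = true) ∧ (∀ v, b = some v → ¬ pvLexLt v r = true) := by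
  induction L with
  | nil =>
    intro b r hr
    simp only [List.foldl_nil] at hr
    subst hr
    exact ⟨Or.inl rfl, by simp, fun v hv => by cases hv; exact pv_lexLt_irrefl r⟩
  | cons c cs ih =>
    intro b r hr
    rw [List.foldl_cons] at hr
    obtain ⟨hmem, hmin, hb⟩ := ih (pvStepMin b c) r hr
    cases b with
    | none =>
      have h1 : ¬ pvLexLt c r = true := hb c rfl
      refine ⟨?_, ?_, fun v hv => by cases hv⟩
      · rcases hmem with h | h
        · simp only [pvStepMin, Option.some.injEq] at h
          exact Or.inr (by rw [← h]; exact List.mem_cons_self)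
        · exact Or.inr (List.mem_cons_of_mem _ h)
      · intro c' hc'
        rcases List.mem_cons.mp hc' with rfl | h
        · exact h1
        · exact hmin c' h
    | some v =>
      by_cases hlt : pvLexLt c v = true
      · have hsm : pvStepMin (some v) c = some c := by simp [pvStepMin, hlt]
        rw [hsm] at hmem hb
        have h1 : ¬ pvLexLt c r = true := hb c rfl
        refine ⟨?_, ?_, ?_⟩
        · rcases hmem with h | h
          · exact Or.inr (by rw [← Option.some.injEq c r |>.mp h]; exact List.mem_cons_self)
          · exact Or.inr (List.mem_cons_of_mem _ h)
        · intro c' hc'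
          rcases List.mem_cons.mp hc' with rfl | h
          · exact h1
          · exact hmin c' h
        · intro w hw
          cases hw
          intro hvr
          exact h1 (pv_lexLt_trans hlt hvr)
      · have hsm : pvStepMin (some v) c = some v := by simp [pvStepMin, hlt]
        rw [hsm] at hmem hb
        have hv : ¬ pvLexLt v r = true := hb v rfl
        refine ⟨?_, ?_, ?_⟩
        · rcases hmem with h | h
          · exact Or.inl h
          · exact Or.inr (List.mem_cons_of_mem _ h)
        · intro c' hc'
          rcases List.mem_cons.mp hc' with rfl | h
          · exact pv_not_lexLt_left hlt hv
          · exact hmin c' h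
        · intro w hw
          cases hw
          exact hv

-- sorted lists are monotone in their indices
theorem pv_sorted_mono (Os : List Int) (hs : Os.Pairwise (· < ·)) (i j : Nat)
    (hij : i ≤ j) (hj : j < Os.length) : Os[i]'(lt_of_le_of_lt hij hj) ≤ Os[j] := by
  rcases Nat.lt_or_ge i j with h | h
  · exact le_of_lt ((List.pairwise_iff_getElem.mp hs) i j _ hj h)
  · have : i = j := le_antisymm hij h
    subst this; exact le_refl _

-- the valley lemma: some bisection neighbour of x is at least as close to x as any o ∈ Os
theorem pv_valley (Os : List Int) (hs : Os.Pairwise (· < ·)) (x o : Int) (ho : o ∈ Os) :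
    ∃ k : Nat, k < Os.length ∧
      ((k : Int) = (PySem.List.bisectLeft Os x : Int) - 1 ∨ (k : Int) = (PySem.List.bisectLeft Os x : Int)) ∧
      (|x - Os.getD k 0| < |x - o| ∨ Os.getD k 0 = o) := by
  obtain ⟨i, hi, hoi⟩ := List.mem_iff_getElem.mp ho
  obtain ⟨hjlen, hlt, hge⟩ := PySem.List.bisectLeft_spec Os x (hs.imp le_of_lt)
  set j := PySem.List.bisectLeft Os x with hj
  rcases le_or_gt x o with hxo | hxo
  · -- o is at or right of x: the successor Os[j] lies between x and o
    have hji : j ≤ i := by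
      by_contra h
      have := hlt i hi (by omega)
      omega
    have hjl : j < Os.length := lt_of_le_of_lt hji hi
    refine ⟨j, hjl, Or.inr rfl, ?_⟩
    have hxc : x ≤ Os[j] := hge j hjl (le_refl _)
    have hco : Os[j] ≤ o := hoi ▸ pv_sorted_mono Os hs j i hji hi
    rw [List.getD_eq_getElem Os 0 hjl]
    rcases eq_or_ne Os[j] o with h | h
    · exact Or.inr h
    · left
      have h1 : |x - Os[j]| = Os[j] - x := by rw [abs_sub_comm]; exact abs_of_nonneg (by omega)
      have h2 : |x - o| = o - x := by rw [abs_sub_comm]; exact abs_of_nonneg (by omega)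
      omega
  · -- o is strictly left of x: the predecessor Os[j-1] lies between o and x
    have hij : i < j := by
      by_contra h
      have := hge i hi (by omega)
      omega
    have hjl : j - 1 < Os.length := by omega
    refine ⟨j - 1, hjl, Or.inl (by omega), ?_⟩
    have hcx : Os[j-1] < x := hlt (j-1) hjl (by omega)
    have hoc : o ≤ Os[j-1] := hoi ▸ pv_sorted_mono Os hs i (j-1) (by omega) hjl
    rw [List.getD_eq_getElem Os 0 hjl]
    rcases eq_or_ne Os[j-1] o with h | h
    · exact Or.inr h
    · left
      have h1 : |x - Os[j-1]| = x - Os[j-1] := abs_of_nonneg (by omega)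
      have h2 : |x - o| = x - o := abs_of_nonneg (by omega)
      omega

theorem pv_mem_pvL (Os : List Int) (la lo a x : Int) (k : Nat) (hk : k < Os.length)
    (hkj : (k : Int) = (PySem.List.bisectLeft Os x : Int) - 1 ∨ (k : Int) = (PySem.List.bisectLeft Os x : Int)) :
    pvKey la lo a (Os.getD k 0) ∈ pvL Os la lo a x := by
  have hvalid : pvValid Os (k : Int) = true := by
    simp only [pvValid, decide_eq_true_eq]
    constructor
    · exact Int.natCast_nonneg k
    · exact_mod_cast hk
  unfold pvL
  refine List.mem_map.mpr ⟨(k : Int), List.mem_filter.mpr ⟨?_, hvalid⟩, ?_⟩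
  · rcases hkj with h | h <;> simp [h]
  · simp

theorem pv_bestFor_spec (Os : List Int) (la lo a : Int) (hs : Os.Pairwise (· < ·)) (hne : Os ≠ []) :
    ∃ d oi, pvBestFor Os la lo a = some (d, oi) ∧ oi ∈ Os ∧ d = pvDv la lo a oi ∧
      ∀ o ∈ Os, pvLe (d, oi) (pvKey la lo a o) := by
  have hfold : pvBestFor Os la lo a
      = (pvL Os la lo a (a - lo) ++ pvL Os la lo a (a + la)).foldl pvStepMin none := by
    have h0 : pvBestFor Os la lo a
        = [(PySem.List.bisectLeft Os (a + la) : Int) - 1, (PySem.List.bisectLeft Os (a + la) : Int)].foldl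
            (pvConsider Os la lo a)
            ([(PySem.List.bisectLeft Os (a - lo) : Int) - 1, (PySem.List.bisectLeft Os (a - lo) : Int)].foldl
              (pvConsider Os la lo a) none) := rfl
    rw [h0, pv_consider_foldl, pv_consider_foldl, ← List.foldl_append]
    rfl
  obtain ⟨o0, ho0⟩ := List.exists_mem_of_ne_nil Os hne
  obtain ⟨k0, hk0l, hk0j, -⟩ := pv_valley Os hs (a + la) o0 ho0
  have hmemL : pvKey la lo a (Os.getD k0 0) ∈ pvL Os la lo a (a - lo) ++ pvL Os la lo a (a + la) :=
    List.mem_append.mpr (Or.inr (pv_mem_pvL Os la lo a (a + la) k0 hk0l hk0j))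
  obtain ⟨r, hr⟩ := pv_stepfold_some _ none (List.ne_nil_of_mem hmemL)
  obtain ⟨hmem, hmin, -⟩ := pv_stepfold_min _ none r hr
  have hrmem : r ∈ pvL Os la lo a (a - lo) ++ pvL Os la lo a (a + la) := by
    rcases hmem with h | h
    · cases h
    · exact h
  have hkeyed : ∃ c ∈ Os, r = pvKey la lo a c := by
    rcases List.mem_append.mp hrmem with h | h <;>
    · unfold pvL at h
      obtain ⟨k, hk, hkey⟩ := List.mem_map.mp h
      have hkv := (List.mem_filter.mp hk).2
      simp only [pvValid, decide_eq_true_eq] at hkv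
      refine ⟨Os.getD k.toNat 0, ?_, hkey.symm⟩
      have hkn : k.toNat < Os.length := by omega
      rw [List.getD_eq_getElem Os 0 hkn]
      exact List.getElem_mem _
  obtain ⟨c, hc, hrc⟩ := hkeyed
  subst hrc
  refine ⟨pvDv la lo a c, c, by rw [hfold, hr]; rfl, hc, rfl, ?_⟩
  intro o ho
  by_cases harm : |a - o - lo| ≤ |a + la - o|
  · -- the valley a - lo realises pvDv o
    obtain ⟨k, hkl, hkj, hcase⟩ := pv_valley Os hs (a - lo) o ho
    have hnlt : ¬ pvLexLt (pvKey la lo a (Os.getD k 0)) (pvKey la lo a c) = true :=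
      hmin _ (List.mem_append.mpr (Or.inl (pv_mem_pvL Os la lo a (a - lo) k hkl hkj)))
    have hler : pvLe (pvKey la lo a c) (pvKey la lo a (Os.getD k 0)) := pv_le_of_not_lexLt hnlt
    rcases hcase with h | h
    · apply pv_le_trans hler
      left
      show pvDv la lo a (Os.getD k 0) < pvDv la lo a o
      unfold pvDv
      have h5 : min |a + la - Os.getD k 0| |a - Os.getD k 0 - lo| ≤ |a - Os.getD k 0 - lo| :=
        min_le_right _ _
      have h6 : min |a + la - o| |a - o - lo| = |a - o - lo| := min_eq_right harm
      have h7 : |a - Os.getD k 0 - lo| = |(a - lo) - Os.getD k 0| := by ring_nf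
      have h8 : |a - o - lo| = |(a - lo) - o| := by ring_nf
      omega
    · rw [h] at hler
      exact hler
  · -- the valley a + la realises pvDv o
    obtain ⟨k, hkl, hkj, hcase⟩ := pv_valley Os hs (a + la) o ho
    have hnlt : ¬ pvLexLt (pvKey la lo a (Os.getD k 0)) (pvKey la lo a c) = true :=
      hmin _ (List.mem_append.mpr (Or.inr (pv_mem_pvL Os la lo a (a + la) k hkl hkj)))
    have hler : pvLe (pvKey la lo a c) (pvKey la lo a (Os.getD k 0)) := pv_le_of_not_lexLt hnlt
    rcases hcase with h | h
    · apply pv_le_trans hler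
      left
      show pvDv la lo a (Os.getD k 0) < pvDv la lo a o
      unfold pvDv
      have h5 : min |a + la - Os.getD k 0| |a - Os.getD k 0 - lo| ≤ |a + la - Os.getD k 0| :=
        min_le_left _ _
      have h6 : min |a + la - o| |a - o - lo| = |a + la - o| := min_eq_left (by omega)
      have h7 : |(a + la) - Os.getD k 0| = |a + la - Os.getD k 0| := by ring_nf
      have h8 : |(a + la) - o| = |a + la - o| := by ring_nf
      omega
    · rw [h] at hler
      exact hler

theorem pv_noupdate (la lo a m : Int) (p : List (List Int)) (Os : List Int)
    (h : ∀ o ∈ Os, ¬ pvDv la lo a o < m) :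
    Os.foldl (pvStepA la lo a) (some m, p) = (some m, p) := by
  induction Os with
  | nil => rfl
  | cons o os ih =>
    rw [List.foldl_cons]
    have h0 : ¬ pvDv la lo a o < m := h o List.mem_cons_self
    have : pvStepA la lo a (some m, p) o = (some m, p) := by
      simp [pvStepA, h0]
    rw [this]
    exact ih (fun o' ho' => h o' (List.mem_cons_of_mem _ ho'))

theorem pv_inner_char (la lo a : Int) (Os : List Int) (hs : Os.Pairwise (· < ·)) (d oi : Int)
    (hd : d = pvDv la lo a oi) (hmem : oi ∈ Os)
    (hmin : ∀ o ∈ Os, pvLe (d, oi) (pvKey la lo a o))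
    (m0 : Option Int) (p0 : List (List Int)) :
    Os.foldl (pvStepA la lo a) (m0, p0)
      = if (match m0 with | none => true | some m => decide (d < m))
          then (some d, [[a, a + la], [oi, oi + lo]]) else (m0, p0) := by
  induction Os generalizing m0 p0 with
  | nil => cases hmem
  | cons o os ih =>
    have hso : ∀ o' ∈ os, o < o' := (List.pairwise_cons.mp hs).1
    have hs' : os.Pairwise (· < ·) := (List.pairwise_cons.mp hs).2
    rw [List.foldl_cons]
    rcases eq_or_ne oi o with rfl | hne2
    · -- the head is the lexicographic argmin
      have hnup : ∀ o' ∈ os, ¬ pvDv la lo a o' < d := by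
        intro o' ho'
        have := hmin o' (List.mem_cons_of_mem _ ho')
        unfold pvLe pvKey at this
        simp only at this
        omega
      cases m0 with
      | none =>
        have hstep : pvStepA la lo a (none, p0) oi = (some (pvDv la lo a oi), [[a, a + la], [oi, oi + lo]]) := by
          simp [pvStepA]
        rw [hstep, ← hd, pv_noupdate la lo a d _ os hnup]
        simp [hd]
      | some m =>
        by_cases hm : pvDv la lo a oi < m
        · have hstep : pvStepA la lo a (some m, p0) oi = (some (pvDv la lo a oi), [[a, a + la], [oi, oi + lo]]) := by
            simp [pvStepA, hm]
          rw [hstep, ← hd, pv_noupdate la lo a d _ os hnup]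
          simp [hd, hm]
        · have hstep : pvStepA la lo a (some m, p0) oi = (some m, p0) := by
            simp [pvStepA, hm]
          have hnup' : ∀ o' ∈ os, ¬ pvDv la lo a o' < m := by
            intro o' ho'
            have := hnup o' ho'
            omega
          rw [hstep, pv_noupdate la lo a m _ os hnup']
          rw [← hd] at hm
          simp [hm]
    · -- the argmin lies in the tail, and it strictly beats the head
      have hoi' : oi ∈ os := by
        rcases List.mem_cons.mp hmem with h | h
        · exact absurd h hne2
        · exact h
      have hlt : d < pvDv la lo a o := by
        have h1 := hmin o List.mem_cons_self
        unfold pvLe pvKey at h1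
        simp only at h1
        have hoo : o < oi := hso oi hoi'
        omega
      have hmin' : ∀ o' ∈ os, pvLe (d, oi) (pvKey la lo a o') :=
        fun o' h => hmin o' (List.mem_cons_of_mem _ h)
      cases m0 with
      | none =>
        have hstep : pvStepA la lo a (none, p0) o = (some (pvDv la lo a o), [[a, a + la], [o, o + lo]]) := by
          simp [pvStepA]
        rw [hstep, ih hs' hoi' hmin']
        simp [hlt]
      | some m =>
        by_cases hm : pvDv la lo a o < m
        · have hstep : pvStepA la lo a (some m, p0) o = (some (pvDv la lo a o), [[a, a + la], [o, o + lo]]) := by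
            simp [pvStepA, hm]
          rw [hstep, ih hs' hoi' hmin']
          have hdm : d < m := lt_trans hlt hm
          simp [hlt, hdm]
        · have hstep : pvStepA la lo a (some m, p0) o = (some m, p0) := by
            simp [pvStepA, hm]
          rw [hstep, ih hs' hoi' hmin']

theorem pv_outer (la lo : Int) (As Os : List Int) (hs : Os.Pairwise (· < ·)) (hne : Os ≠ [])
    (b : Option (Int × Int × Int)) :
    As.foldl (fun st ai => Os.foldl (pvStepA la lo ai) st) (pvPhi la lo b)
      = pvPhi la lo (As.foldl (fun b ai =>
          match pvBestFor Os la lo ai with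
          | none => b
          | some (d, oi) =>
            match b with
            | none => some (d, ai, oi)
            | some bb => if d < bb.1 then some (d, ai, oi) else some bb) b) := by
  induction As generalizing b with
  | nil => rfl
  | cons ai As ih =>
    rw [List.foldl_cons, List.foldl_cons]
    obtain ⟨d, oi, hbf, hmem, hd, hmin⟩ := pv_bestFor_spec Os la lo ai hs hne
    have hstep : Os.foldl (pvStepA la lo ai) (pvPhi la lo b)
        = pvPhi la lo (match pvBestFor Os la lo ai with
            | none => b
            | some (d, oi) =>
              match b with
              | none => some (d, ai, oi)
              | some bb => if d < bb.1 then some (d, ai, oi) else some bb) := by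
      rw [hbf]
      cases b with
      | none =>
        rw [show pvPhi la lo none = (none, []) from rfl]
        rw [pv_inner_char la lo ai Os hs d oi hd hmem hmin none []]
        rfl
      | some bb =>
        obtain ⟨bd, ba, bo⟩ := bb
        rw [show pvPhi la lo (some (bd, ba, bo)) = (some bd, [[ba, ba + la], [bo, bo + lo]]) from rfl]
        rw [pv_inner_char la lo ai Os hs d oi hd hmem hmin (some bd) _]
        by_cases hlt : d < bd
        · simp [hlt, pvPhi]
        · simp [hlt, pvPhi]
    rw [hstep]
    exact ih _

theorem pv_Aselect (la lo : Int) (As Os : List Int) :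
    ((As.map (fun i => [i, i + la])).foldl (fun st aIdx =>
      ((Os.map (fun i => [i, i + lo])).foldl (fun (st : Option Int × List (List Int)) oIdx =>
        let d := min |PySem.List.pyGetD aIdx (-1) 0 - PySem.List.pyGetD oIdx 0 0|
                     |PySem.List.pyGetD aIdx 0 0 - PySem.List.pyGetD oIdx (-1) 0|
        if (match st.1 with | none => true | some m => decide (d < m))
          then (some d, [aIdx, oIdx]) else st) st)) ((none, []) : Option Int × List (List Int)))
    = As.foldl (fun st ai => Os.foldl (pvStepA la lo ai) st) ((none, []) : Option Int × List (List Int)) := by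
  rw [List.foldl_map]
  congr 1
  funext st ai
  rw [List.foldl_map]
  congr 1
  funext st2 oi
  simp [pvStepA, pvDv, pv_getD_pair_last, sub_add_eq_sub_sub]

theorem pv_phi_snd (la lo : Int) (b : Option (Int × Int × Int)) :
    (match b with
      | none => ([] : List (List Int))
      | some (_, ai, oi) => [[ai, ai + la], [oi, oi + lo]]) = (pvPhi la lo b).2 := by
  rcases b with - | ⟨d, ai, oi⟩ <;> rfl

-- ===== VERDICT (by name: the statement is the Claim_ definition above) =====
theorem match_index_spec : Claim_equal_match_index := by
  intro w a o _
  unfold Spec_match_index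
  show match_index w a o = match_index_alt w a o
  simp only [match_index, match_index_alt]
  rw [pv_occ_alt_eq w a, pv_occ_alt_eq w o]
  rw [PySem.List.foldl_prod_mk
        (f := fun acc i => if a == PySem.List.slice w (some i) (some (i + (a.length : Int)))
          then acc ++ [[i, i + (a.length : Int)]] else acc)
        (g := fun acc i => if o == PySem.List.slice w (some i) (some (i + (o.length : Int)))
          then acc ++ [[i, i + (o.length : Int)]] else acc)]
  rw [PySem.List.foldl_append_if, PySem.List.foldl_append_if, List.nil_append, List.nil_append]
  rw [show (PySem.List.pyRange 0 (w.length : Int) 1).filter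
        (fun i => a == PySem.List.slice w (some i) (some (i + (a.length : Int)))) = pvOccA w a from rfl]
  rw [show (PySem.List.pyRange 0 (w.length : Int) 1).filter
        (fun i => o == PySem.List.slice w (some i) (some (i + (o.length : Int)))) = pvOccA w o from rfl]
  by_cases hOs : pvOccA w o = []
  · rw [if_pos (Or.inr hOs), hOs]
    simp
  · by_cases hAs : pvOccA w a = []
    · rw [if_pos (Or.inl hAs), hAs]
      simp
    · rw [if_neg (by tauto)]
      rw [pv_Aselect (a.length : Int) (o.length : Int) (pvOccA w a) (pvOccA w o)]
      rw [show ((none, []) : Option Int × List (List Int)) = pvPhi (a.length : Int) (o.length : Int) none from rfl]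
      rw [pv_outer (a.length : Int) (o.length : Int) (pvOccA w a) (pvOccA w o) (pv_occA_sorted w o) hOs none]
      rw [pv_phi_snd]
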